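-- pv_equiv track=rewrite | github.com/wangboyu15/RL_EMQV | OMS/OMS_test_real_data.py | lobsterLOB_to_listLOB
-- ===== SOURCE A (Python) =====
-- def lobsterLOB_to_listLOB(init_LOB):
--     init_Ask = []
--     init_Bid = []
--     for i in range(len(init_LOB)):
--         if i % 4 == 0:  # ask price
--             init_Ask.append(init_LOB[i])
--         elif i % 4 == 1:  # ask size
--             init_Ask.append(init_LOB[i])
--         elif i % 4 == 2:  # bid price
--             init_Bid.append(init_LOB[i])
--         else:
--             init_Bid.append(init_LOB[i])
--     return init_Ask, init_Bid
-- ===== SOURCE B (Python) =====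
-- def lobsterLOB_to_listLOB(init_LOB):
--     init_Ask = []
--     init_Bid = []
--     for i in range(0, len(init_LOB), 4):
--         init_Ask += init_LOB[i:i+2]
--         init_Bid += init_LOB[i+2:i+4]
--     return init_Ask, init_Bid
-- ===== Notes on version B (the rewrite author's own statement) =====
-- stated objective: alternative
-- what changed: B iterates over record starts range(0, len, 4) and extends asks with the slice [i:i+2] and bids with [i+2:i+4], instead of A's per-element loop with a 4-way i%4 case split.
import Mathlib
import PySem

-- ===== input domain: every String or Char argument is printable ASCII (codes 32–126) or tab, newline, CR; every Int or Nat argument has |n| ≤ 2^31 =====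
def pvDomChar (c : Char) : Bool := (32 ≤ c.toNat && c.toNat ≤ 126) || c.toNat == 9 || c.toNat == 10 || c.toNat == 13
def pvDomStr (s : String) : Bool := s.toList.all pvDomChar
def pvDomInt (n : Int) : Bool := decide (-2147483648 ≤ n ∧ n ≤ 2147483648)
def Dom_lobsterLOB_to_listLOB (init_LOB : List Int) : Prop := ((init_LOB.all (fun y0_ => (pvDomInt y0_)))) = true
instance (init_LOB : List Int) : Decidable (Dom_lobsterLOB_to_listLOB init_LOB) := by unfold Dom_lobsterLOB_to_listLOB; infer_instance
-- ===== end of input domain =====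

-- B walks record starts i = 0,4,8,… extending asks with the slice [i:i+2] and bids with [i+2:i+4], instead of A's per-element loop with an i%4 case split; same cost, different decomposition.


-- ===== PORT A =====
-- for i in range(len(init_LOB)): 4-way case split on i % 4, appending init_LOB[i] (always in range, so pyGetD)
def lobsterLOB_to_listLOB (init_LOB : List Int) : List Int × List Int :=
  (PySem.List.pyRange 0 (PySem.List.len init_LOB) 1).foldl
    (fun acc i =>
      if PySem.Int.mod i 4 = 0 then (acc.1 ++ [PySem.List.pyGetD init_LOB i 0], acc.2)
      else if PySem.Int.mod i 4 = 1 then (acc.1 ++ [PySem.List.pyGetD init_LOB i 0], acc.2)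
      else if PySem.Int.mod i 4 = 2 then (acc.1, acc.2 ++ [PySem.List.pyGetD init_LOB i 0])
      else (acc.1, acc.2 ++ [PySem.List.pyGetD init_LOB i 0]))
    ([], [])

-- ===== PORT B =====
-- for i in range(0, len(init_LOB), 4): init_Ask += init_LOB[i:i+2]; init_Bid += init_LOB[i+2:i+4]
def lobsterLOB_to_listLOB_alt (init_LOB : List Int) : List Int × List Int :=
  (PySem.List.pyRange 0 (PySem.List.len init_LOB) 4).foldl
    (fun acc i =>
      (acc.1 ++ PySem.List.slice init_LOB (some i) (some (i + 2)),
       acc.2 ++ PySem.List.slice init_LOB (some (i + 2)) (some (i + 4))))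
    ([], [])

-- ===== PRECONDITION & SPEC =====
def Spec_lobsterLOB_to_listLOB (init_LOB : List Int) (out : List Int × List Int) : Prop := out = lobsterLOB_to_listLOB_alt init_LOB
instance (init_LOB : List Int) (out : List Int × List Int) : Decidable (Spec_lobsterLOB_to_listLOB init_LOB out) := by unfold Spec_lobsterLOB_to_listLOB; infer_instance

-- ===== CLAIM (what is proved, stated in full; the proofs are below) =====
def Claim_equal_lobsterLOB_to_listLOB : Prop := ∀ (init_LOB : List Int), Dom_lobsterLOB_to_listLOB init_LOB → Spec_lobsterLOB_to_listLOB init_LOB (lobsterLOB_to_listLOB init_LOB)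

-- ===== LEMMAS AND PROOFS =====

-- common reference: consume the list one 4-field record at a time
def pvGo (rest ask bid : List Int) : List Int × List Int :=
  if rest = [] then (ask, bid)
  else pvGo (rest.drop 4) (ask ++ rest.take 2) (bid ++ (rest.drop 2).take 2)
termination_by rest.length
decreasing_by
  rename_i h
  have : rest.length ≠ 0 := fun hc => h (List.eq_nil_of_length_eq_zero hc)
  simp; omega

-- A's loop body, as a function of the (index, value) pair
def pvStepA (acc : List Int × List Int) (p : Int × Int) : List Int × List Int :=
  if PySem.Int.mod p.1 4 = 0 then (acc.1 ++ [p.2], acc.2)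
  else if PySem.Int.mod p.1 4 = 1 then (acc.1 ++ [p.2], acc.2)
  else if PySem.Int.mod p.1 4 = 2 then (acc.1, acc.2 ++ [p.2])
  else (acc.1, acc.2 ++ [p.2])

lemma pvLoopA (xs : List Int) (s : Nat) (hs : s % 4 = 0) (ask bid : List Int) :
    (PySem.List.enumerate xs (s : Int)).foldl pvStepA (ask, bid)
      = pvGo xs ask bid := by
  induction hn : xs.length using Nat.strong_induction_on generalizing xs s ask bid with
  | _ n ih =>
  have hd0 : (4:Int) ∣ (s:Int) := by omega
  have hd1 : ¬ (4:Int) ∣ ((s:Int) + 1) := by omega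
  have h1 : ((s:Int) + 1) % 4 = 1 := by omega
  have hd2 : ¬ (4:Int) ∣ ((s:Int) + 1 + 1) := by omega
  have h2 : ((s:Int) + 1 + 1) % 4 = 2 := by omega
  have hd3 : ¬ (4:Int) ∣ ((s:Int) + 1 + 1 + 1) := by omega
  have h3 : ((s:Int) + 1 + 1 + 1) % 4 = 3 := by omega
  match xs with
  | [] => simp [PySem.List.enumerate_nil, pvGo]
  | [a] =>
    simp [PySem.List.enumerate_cons, PySem.List.enumerate_nil, pvStepA, hd0, pvGo]
  | [a, b] =>
    simp [PySem.List.enumerate_cons, PySem.List.enumerate_nil, pvStepA, hd0, h1, pvGo]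
  | [a, b, c] =>
    simp [PySem.List.enumerate_cons, PySem.List.enumerate_nil, pvStepA, hd0, h1, h2, pvGo]
  | a :: b :: c :: d :: t =>
    have hcast : (s : Int) + 1 + 1 + 1 + 1 = ((s + 4 : Nat) : Int) := by push_cast; ring
    simp only [PySem.List.enumerate_cons, List.foldl_cons]
    simp only [pvStepA]
    simp only [show ∀ x : Int, (PySem.Int.mod x 4 = 0) = ((4:Int) ∣ x) from fun x => by
      rw [PySem.Int.mod_eq_zero_iff_dvd]]
    simp only [show ∀ x : Int, PySem.Int.mod x 4 = x % 4 from fun x =>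
      PySem.Int.mod_eq_emod_of_pos (by norm_num)]
    simp only [hd0, hd1, h1, hd2, h2, hd3, h3, if_true, if_false]
    norm_num
    rw [hcast, ih t.length (by simp at hn; omega) t (s + 4) (by omega)
      (ask ++ [a, b]) (bid ++ [c, d]) rfl]
    conv_rhs => rw [pvGo]
    simp

-- pyRange with step 4 peels its first element
lemma pvRange4_cons (a b : Int) (h : a < b) :
    PySem.List.pyRange a b 4 = a :: PySem.List.pyRange (a + 4) b 4 := by
  rw [PySem.List.pyRange_of_pos _ _ (by norm_num : (0:Int) < 4),
    PySem.List.pyRange_of_pos _ _ (by norm_num : (0:Int) < 4)]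
  by_cases h4 : a + 4 < b
  · have hn : ((b - a + 4 - 1) / 4).toNat = ((b - (a + 4) + 4 - 1) / 4).toNat + 1 := by omega
    rw [if_pos h, if_pos h4, hn, List.range_succ_eq_map]
    simp only [List.map_cons, List.map_map]
    refine List.cons_eq_cons.mpr ⟨by norm_num, ?_⟩
    apply List.map_congr_left
    intro k _
    simp [Function.comp, Nat.succ_eq_add_one]
    ring
  · have hn : ((b - a + 4 - 1) / 4).toNat = 1 := by omega
    rw [if_pos h, if_neg h4, hn]
    simp

lemma pvLoopB (xs : List Int) (s : Nat) (ask bid : List Int) :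
    (PySem.List.pyRange (s : Int) (PySem.List.len xs) 4).foldl
      (fun acc i =>
        (acc.1 ++ PySem.List.slice xs (some i) (some (i + 2)),
         acc.2 ++ PySem.List.slice xs (some (i + 2)) (some (i + 4))))
      (ask, bid) = pvGo (xs.drop s) ask bid := by
  induction hn : xs.length - s using Nat.strong_induction_on generalizing s ask bid with
  | _ n ih =>
  by_cases hlt : s < xs.length
  · rw [pvRange4_cons _ _ (by simp [PySem.List.len_eq]; exact_mod_cast hlt), List.foldl_cons]
    have e1 : PySem.List.slice xs (some (s:Int)) (some ((s:Int) + 2)) = (xs.drop s).take 2 := by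
      rw [show ((s:Int) + 2 = (s:Int) + ((2:Nat):Int)) by norm_num,
        PySem.List.slice_natCast_add]
    have e2 : PySem.List.slice xs (some ((s:Int) + 2)) (some ((s:Int) + 4))
        = ((xs.drop s).drop 2).take 2 := by
      rw [show ((s:Int) + 4 = ((s + 2 : Nat):Int) + ((2:Nat):Int)) by push_cast; ring,
        show ((s:Int) + 2 = ((s + 2 : Nat):Int)) by push_cast; ring,
        PySem.List.slice_natCast_add]
      simp [List.drop_drop]
    rw [e1, e2]
    rw [show ((s:Int) + 4 = ((s + 4 : Nat):Int)) by push_cast; ring]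
    rw [ih (xs.length - (s + 4)) (by omega) (s + 4) _ _ rfl]
    conv_rhs => rw [pvGo]
    rw [if_neg (by simp; omega)]
    simp [List.drop_drop]
  · have hb : (PySem.List.len xs : Int) ≤ (s : Int) := by
      simp [PySem.List.len_eq]; exact_mod_cast Nat.le_of_not_lt hlt
    rw [PySem.List.pyRange_of_pos _ _ (by norm_num : (0:Int) < 4),
      if_neg (by omega), List.drop_eq_nil_of_le (Nat.le_of_not_lt hlt)]
    simp [pvGo]

theorem lobsterLOB_to_listLOB_eq (xs : List Int) :
    lobsterLOB_to_listLOB xs = lobsterLOB_to_listLOB_alt xs := by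
  have hA : lobsterLOB_to_listLOB xs = pvGo xs [] [] := by
    have hmap : lobsterLOB_to_listLOB xs
        = (PySem.List.enumerate xs ((0:Nat) : Int)).foldl pvStepA ([], []) := by
      unfold lobsterLOB_to_listLOB
      rw [show ((0:Nat):Int) = (0:Int) from rfl,
        PySem.List.enumerate_eq_map_pyRange (d := 0), List.foldl_map]
      rfl
    rw [hmap, pvLoopA xs 0 rfl [] []]
  have hB : lobsterLOB_to_listLOB_alt xs = pvGo xs [] [] := by
    unfold lobsterLOB_to_listLOB_alt
    have := pvLoopB xs 0 [] []
    simpa using this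
  rw [hA, hB]

-- ===== VERDICT (by name: the statement is the Claim_ definition above) =====
theorem lobsterLOB_to_listLOB_spec : Claim_equal_lobsterLOB_to_listLOB := by
  intro xs _
  unfold Spec_lobsterLOB_to_listLOB
  exact lobsterLOB_to_listLOB_eq xs
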